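-- pv_equiv track=rewrite | github.com/aoc4fun/allinone2022 | lschamber/day7/AoC.py | compute_all_folders_sizes
-- ===== SOURCE A (Python) =====
-- def compute_all_folders_sizes(contents):
--     # Sort folders by depth to process the most in depth first and remove root
--     folder_names = sorted(list(contents.keys()), key=lambda name: len(name.split("/")), reverse=True)
--     folder_names.remove("/")
--
--     folder_sizes = dict()
--
--     for folder in folder_names:
--         size = compute_folder_size(contents, folder, folder_sizes)
--         folder_sizes[folder] = size
--
--     folder_sizes["/"] = compute_folder_size(contents, "/", folder_sizes)
--
--     return folder_sizes
--
-- def compute_folder_size(contents, folder, folder_sizes):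
--     size = 0
--     for file in contents.get(folder):
--         if file[0] != -1:
--             size += file[0]
--         else:
--             folder_name = folder + "/" + file[1] if folder != "/" else folder + file[1]
--             size += folder_sizes.get(folder_name)
--     return size
-- ===== SOURCE B (Python) =====
-- def compute_all_folders_sizes(contents):
--     # Memoized recursion over the folder tree instead of a sorted bottom-up pass.
--     # (Output dict is emitted deepest-first with "/" last, like the original.)
--     memo = {}
--
--     def size(folder):
--         if folder in memo:
--             return memo[folder]
--         total = 0
--         for entry in contents.get(folder):
--             if entry[0] != -1:
--                 total += entry[0]
--             else:
--                 child = folder + "/" + entry[1] if folder != "/" else folder + entry[1]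
--                 total += size(child)
--         memo[folder] = total
--         return total
--
--     result = {}
--     for folder in sorted(contents, key=lambda name: len(name.split("/")), reverse=True):
--         if folder != "/":
--             result[folder] = size(folder)
--     result["/"] = size("/")
--     return result
-- ===== Notes on version B (the rewrite author's own statement) =====
-- stated objective: alternative
-- what changed: Replaces the depth-ordered bottom-up pass that reads previously stored child sizes out of the result dict with a memoized recursive size(folder) function that descends the folder tree itself; the result dict is still emitted deepest-first with '/' last.
import Mathlib
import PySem

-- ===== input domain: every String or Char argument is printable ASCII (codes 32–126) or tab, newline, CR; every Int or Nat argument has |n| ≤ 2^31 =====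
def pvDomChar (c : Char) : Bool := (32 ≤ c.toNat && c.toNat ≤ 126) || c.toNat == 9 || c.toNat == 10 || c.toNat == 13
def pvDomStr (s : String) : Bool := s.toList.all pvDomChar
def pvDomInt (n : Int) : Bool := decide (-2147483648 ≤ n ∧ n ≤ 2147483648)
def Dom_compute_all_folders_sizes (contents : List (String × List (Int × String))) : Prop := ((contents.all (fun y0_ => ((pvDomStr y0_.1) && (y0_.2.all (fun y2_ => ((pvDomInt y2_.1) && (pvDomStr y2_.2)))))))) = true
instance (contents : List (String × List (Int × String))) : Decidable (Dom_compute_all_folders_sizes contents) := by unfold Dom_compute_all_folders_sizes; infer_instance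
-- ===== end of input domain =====

-- B replaces A's depth-ordered bottom-up pass (which reads child sizes out of the dict built
-- so far) with a memoized recursive size function over the folder tree; same return value.

-- helper shared by both ports: the Python expression
-- `folder + "/" + name if folder != "/" else folder + name`
def pvChild (folder name : String) : String :=
  if folder != "/" then folder ++ "/" ++ name else folder ++ name

-- the sort key `len(name.split("/"))`
def pvDepth (name : String) : Nat := (PySem.Chars.splitOn name.toList ['/']).length

-- ===== PORT A =====
-- `compute_folder_size`; returns none where the Python raises
-- (contents.get(folder) is None, or folder_sizes.get(...) is None)
def compute_folder_size (contents : PySem.Dict String (List (Int × String)))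
    (folder : String) (folder_sizes : PySem.Dict String Int) : Option Int :=
  match PySem.Dict.get? contents folder with
  | none => none
  | some files =>
      files.foldl (fun acc file =>
        acc.bind fun size =>
          if file.1 != -1 then some (size + file.1)
          else (PySem.Dict.get? folder_sizes (pvChild folder file.2)).map (fun v => size + v))
        (some 0)

def compute_all_folders_sizes (contents : List (String × List (Int × String))) : List (String × Int) :=
  let d := PySem.Dict.mk contents
  let folder_names := PySem.List.sorted d.keys (fun name => pvDepth name) true
  match PySem.List.remove? folder_names "/" with
  | none => []          -- folder_names.remove("/") raises ValueError; excluded by Pre_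
  | some names =>
      let sizes := names.foldl (fun acc folder =>
          acc.bind fun fs => (compute_folder_size d folder fs).map fun s => fs.insert folder s)
        (some PySem.Dict.empty)
      match sizes.bind (fun fs => (compute_folder_size d "/" fs).map fun s => fs.insert "/" s) with
      | none => []      -- a compute_folder_size call raised; excluded by Pre_
      | some fs => fs.items

-- ===== PORT B =====
-- the inner memoized `size(folder)`, threading the memo dict; fuel only makes the recursion
-- structural: contents.length + 1 exceeds every parent-to-child chain (child paths are strictly
-- longer strings and must be keys), so fuel never runs out where the Python returns
def pvSizeMemo (contents : PySem.Dict String (List (Int × String))) :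
    Nat → PySem.Dict String Int → String → Option (Int × PySem.Dict String Int)
  | 0, _, _ => none
  | fuel+1, memo, folder =>
    match PySem.Dict.get? memo folder with
    | some v => some (v, memo)
    | none =>
      match PySem.Dict.get? contents folder with
      | none => none
      | some files =>
        (files.foldl (fun acc entry =>
            acc.bind fun st =>
              if entry.1 != -1 then some (st.1 + entry.1, st.2)
              else (pvSizeMemo contents fuel st.2 (pvChild folder entry.2)).map
                     fun r => (st.1 + r.1, r.2))
          (some (0, memo))).map fun st => (st.1, st.2.insert folder st.1)

def compute_all_folders_sizes_alt (contents : List (String × List (Int × String))) : List (String × Int) :=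
  let d := PySem.Dict.mk contents
  let fuel := contents.length + 1
  let st := (PySem.List.sorted d.keys (fun name => pvDepth name) true).foldl
      (fun acc folder => acc.bind fun rm =>
        if folder != "/" then
          (pvSizeMemo d fuel rm.2 folder).map fun r => (rm.1.insert folder r.1, r.2)
        else some rm)
      (some (PySem.Dict.empty, PySem.Dict.empty))
  match st.bind (fun rm => (pvSizeMemo d fuel rm.2 "/").map fun r => (rm.1.insert "/" r.1, r.2)) with
  | none => []
  | some rm => rm.1.items

-- ===== PRECONDITION & SPEC =====
-- Pre_ = exactly the inputs where the Python A returns: keys unique (a dict), "/" present, every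
-- subdirectory entry's child path again a key and never "/" itself (A would look "/" up before it
-- is stored).  The last conjunct (a child path has strictly more "/"-components than its parent)
-- always holds and is stated only so the proofs need no lemma about splitting concatenations.
def Pre_compute_all_folders_sizes (contents : List (String × List (Int × String))) : Prop :=
  (contents.map Prod.fst).Nodup ∧
  "/" ∈ contents.map Prod.fst ∧
  ∀ p ∈ contents, ∀ e ∈ p.2, e.1 = -1 →
    pvChild p.1 e.2 ∈ contents.map Prod.fst ∧
    pvChild p.1 e.2 ≠ "/" ∧
    (p.1 ≠ "/" → pvDepth p.1 < pvDepth (pvChild p.1 e.2))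
instance (contents : List (String × List (Int × String))) : Decidable (Pre_compute_all_folders_sizes contents) := by
  unfold Pre_compute_all_folders_sizes; infer_instance

def pvWitness_compute_all_folders_sizes : (List (String × List (Int × String))) :=
  [("/", [((3 : Int), "a"), ((-1 : Int), "a")]), ("/a", [((5 : Int), "x")])]

def Spec_compute_all_folders_sizes (contents : List (String × List (Int × String))) (out : List (String × Int)) : Prop := out = compute_all_folders_sizes_alt contents
instance (contents : List (String × List (Int × String))) (out : List (String × Int)) : Decidable (Spec_compute_all_folders_sizes contents out) := by unfold Spec_compute_all_folders_sizes; infer_instance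

-- ===== CLAIM (what is proved, stated in full; the proofs are below) =====
def Claim_equal_compute_all_folders_sizes : Prop := ∀ (contents : List (String × List (Int × String))), Dom_compute_all_folders_sizes contents → Pre_compute_all_folders_sizes contents → Spec_compute_all_folders_sizes contents (compute_all_folders_sizes contents)

-- ===== LEMMAS AND PROOFS =====

-- the reference size function (proof-side only): pure fuelled recursion
def pvSpec (contents : List (String × List (Int × String))) : Nat → String → Option Int
  | 0, _ => none
  | n+1, folder =>
    (PySem.Dict.get? (PySem.Dict.mk contents) folder).bind fun files =>
      files.foldl (fun acc e =>
        acc.bind fun s =>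
          if e.1 = -1 then (pvSpec contents n (pvChild folder e.2)).map (fun v => s + v)
          else some (s + e.1)) (some 0)

def pvKeys (contents : List (String × List (Int × String))) : List String :=
  contents.map Prod.fst

-- fuel measure: number of keys strictly longer than f
def pvM (contents : List (String × List (Int × String))) (f : String) : Nat :=
  ((pvKeys contents).filter (fun k => f.length < k.length)).length

-- the folder's size
def pvW (contents : List (String × List (Int × String))) (f : String) : Int :=
  (pvSpec contents (pvM contents f + 1) f).getD 0

-- contribution of one directory entry
def pvT (contents : List (String × List (Int × String))) (f : String) (e : Int × String) : Int :=
  if e.1 = -1 then pvW contents (pvChild f e.2) else e.1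

-- consolidated facts about children, derived from Pre_
def pvH (contents : List (String × List (Int × String))) : Prop :=
  ∀ p ∈ contents, ∀ e ∈ p.2, e.1 = -1 →
    pvChild p.1 e.2 ∈ pvKeys contents ∧
    p.1.length < (pvChild p.1 e.2).length ∧
    (p.1 ≠ "/" → pvDepth p.1 < pvDepth (pvChild p.1 e.2)) ∧
    pvChild p.1 e.2 ≠ "/"

theorem pvChild_len (f n : String) (h : f ≠ "/" ∨ n ≠ "") : f.length < (pvChild f n).length := by
  by_cases hf : f = "/"
  · have hn : n ≠ "" := by tauto
    have hp : 0 < n.length := by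
      cases hx : n.length with
      | zero => exact absurd (String.length_eq_zero_iff.mp hx) hn
      | succ k => omega
    subst hf
    simp [pvChild, String.length_append]
    omega
  · simp [pvChild, hf, String.length_append]
    have : ("/" : String).length = 1 := by decide
    omega

theorem pvH_of_pre (contents : List (String × List (Int × String)))
    (h : Pre_compute_all_folders_sizes contents) : pvH contents := by
  intro p hp e he hneg
  obtain ⟨hk, hne, hdep⟩ := h.2.2 p hp e he hneg
  refine ⟨hk, ?_, hdep, hne⟩
  apply pvChild_len
  by_contra hc
  push Not at hc
  apply hne
  rw [hc.1, hc.2]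
  decide

theorem pvCountP_lt {α : Type} (l : List α) (p q : α → Bool)
    (h : ∀ x ∈ l, p x = true → q x = true) (c : α) (hc : c ∈ l)
    (hq : q c = true) (hp : p c = false) : l.countP p < l.countP q := by
  induction l with
  | nil => cases hc
  | cons x xs ih =>
    rcases List.mem_cons.mp hc with rfl | hc
    · simp [hp, hq]
      exact List.countP_mono_left (fun x hx => h x (List.mem_cons_of_mem _ hx))
    · have := ih (fun x hx hpx => h x (List.mem_cons_of_mem _ hx) hpx) hc
      rw [List.countP_cons, List.countP_cons]
      by_cases hpx : p x = true
      · have hqx := h x (List.mem_cons_self) hpx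
        simp [hpx, hqx]; omega
      · simp [hpx]
        omega

theorem pvM_child_lt (contents : List (String × List (Int × String)))
    (f c : String) (hc : c ∈ pvKeys contents) (hlen : f.length < c.length) :
    pvM contents c < pvM contents f := by
  unfold pvM
  rw [← List.countP_eq_length_filter, ← List.countP_eq_length_filter]
  exact pvCountP_lt _ _ _ (fun x _ hx => by simp at *; omega) c hc (by simpa) (by simp)

theorem pvGet_mem (contents : List (String × List (Int × String)))
    (hnd : (pvKeys contents).Nodup) (f : String) (files : List (Int × String))
    (h : PySem.Dict.get? (PySem.Dict.mk contents) f = some files) :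
    (f, files) ∈ contents ∧ f ∈ pvKeys contents := by
  have hk : (PySem.Dict.mk contents).keys.Nodup := by
    rw [PySem.Dict.keys_mk]; exact hnd
  have := (PySem.Dict.get?_eq_some_iff_mem_items _ _ _ hk).mp h
  exact ⟨this, List.mem_map_of_mem this⟩

theorem pvMem_get (contents : List (String × List (Int × String)))
    (hnd : (pvKeys contents).Nodup) (f : String) (hf : f ∈ pvKeys contents) :
    ∃ files, (f, files) ∈ contents ∧ PySem.Dict.get? (PySem.Dict.mk contents) f = some files := by
  obtain ⟨⟨f', files⟩, hm, rfl⟩ := List.mem_map.mp hf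
  have hk : (PySem.Dict.mk contents).keys.Nodup := by
    rw [PySem.Dict.keys_mk]; exact hnd
  exact ⟨files, hm, (PySem.Dict.get?_eq_some_iff_mem_items _ _ _ hk).mpr hm⟩

-- generic: a fold whose step turns `some s` into `some (s + t e)` sums up
theorem pvFoldAdd {α : Type} (l : List α) (step : Option Int → α → Option Int)
    (t : α → Int) (h : ∀ e ∈ l, ∀ s : Int, step (some s) e = some (s + t e)) :
    ∀ a : Int, l.foldl step (some a) = some (a + (l.map t).sum) := by
  induction l with
  | nil => intro a; simp
  | cons x xs ih =>
    intro a
    rw [List.foldl_cons, h x List.mem_cons_self a,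
      ih (fun e he s => h e (List.mem_cons_of_mem _ he) s) (a + t x)]
    simp; ring

-- pvSpec returns some (pvW f) at every sufficient fuel, for keys f
theorem pvSpec_eq (contents : List (String × List (Int × String)))
    (hnd : (pvKeys contents).Nodup) (hH : pvH contents) (M : Nat) :
    ∀ (f : String), f ∈ pvKeys contents → pvM contents f ≤ M →
      ∀ n : Nat, pvM contents f < n → pvSpec contents n f = some (pvW contents f) := by
  induction M using Nat.strong_induction_on with
  | _ M IH =>
  intro f hf hM n hn
  obtain ⟨files, hmem, hget⟩ := pvMem_get contents hnd f hf
  have key : ∀ m : Nat, pvM contents f < m →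
      pvSpec contents m f = some ((files.map (pvT contents f)).sum) := by
    intro m hm
    match m, hm with
    | m₀+1, hm =>
    show (PySem.Dict.get? (PySem.Dict.mk contents) f).bind _ = _
    rw [hget, Option.bind_some]
    rw [pvFoldAdd files _ (pvT contents f) ?_ 0]
    · rw [Int.zero_add]
    · intro e he s
      by_cases hneg : e.1 = -1
      · obtain ⟨hck0, hclen0, -, -⟩ := hH (f, files) hmem e he hneg
        have hck : pvChild f e.2 ∈ pvKeys contents := hck0
        have hclen : f.length < (pvChild f e.2).length := hclen0
        have hmc : pvM contents (pvChild f e.2) < pvM contents f :=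
          pvM_child_lt contents f _ hck hclen
        rw [IH (pvM contents (pvChild f e.2)) (by omega) _ hck (le_refl _) m₀ (by omega)]
        simp [hneg, pvT]
      · simp [hneg, pvT]
  have hw : pvW contents f = (files.map (pvT contents f)).sum := by
    unfold pvW
    rw [key (pvM contents f + 1) (Nat.lt_succ_self _)]
    rfl
  rw [key n hn, hw]

-- the folder size as the sum of its entries' contributions
theorem pvW_eq_sum (contents : List (String × List (Int × String)))
    (hnd : (pvKeys contents).Nodup) (hH : pvH contents)
    (f : String) (files : List (Int × String))
    (hf : f ∈ pvKeys contents)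
    (hget : PySem.Dict.get? (PySem.Dict.mk contents) f = some files) :
    pvW contents f = (files.map (pvT contents f)).sum := by
  have hmem := (pvGet_mem contents hnd f files hget).1
  have h1 : pvSpec contents (pvM contents f + 1) f = some (pvW contents f) :=
    pvSpec_eq contents hnd hH (pvM contents f) f hf (le_refl _) _ (Nat.lt_succ_self _)
  have h2 : pvSpec contents (pvM contents f + 1) f = some ((files.map (pvT contents f)).sum) := by
    show (PySem.Dict.get? (PySem.Dict.mk contents) f).bind _ = _
    rw [hget, Option.bind_some]
    rw [pvFoldAdd files _ (pvT contents f) ?_ 0]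
    · rw [Int.zero_add]
    · intro e he s
      by_cases hneg : e.1 = -1
      · obtain ⟨hck0, hclen0, -, -⟩ := hH (f, files) hmem e he hneg
        have hck : pvChild f e.2 ∈ pvKeys contents := hck0
        have hclen : f.length < (pvChild f e.2).length := hclen0
        have hmc : pvM contents (pvChild f e.2) < pvM contents f :=
          pvM_child_lt contents f _ hck hclen
        rw [pvSpec_eq contents hnd hH (pvM contents (pvChild f e.2)) _ hck (le_refl _)
          (pvM contents f) hmc]
        simp [hneg, pvT]
      · simp [hneg, pvT]
  rw [h1] at h2
  exact (Option.some.injEq _ _ ▸ h2 : _)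

-- A's compute_folder_size returns the folder size once all child sizes are stored
theorem pvCfs_eq (contents : List (String × List (Int × String)))
    (hnd : (pvKeys contents).Nodup) (hH : pvH contents)
    (f : String) (files : List (Int × String))
    (hf : f ∈ pvKeys contents)
    (hget : PySem.Dict.get? (PySem.Dict.mk contents) f = some files)
    (fs : PySem.Dict String Int)
    (hfs : ∀ e ∈ files, e.1 = -1 →
      PySem.Dict.get? fs (pvChild f e.2) = some (pvW contents (pvChild f e.2))) :
    compute_folder_size (PySem.Dict.mk contents) f fs = some (pvW contents f) := by
  unfold compute_folder_size
  simp only [hget]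
  rw [pvFoldAdd files _ (pvT contents f) ?_ 0]
  · rw [Int.zero_add, pvW_eq_sum contents hnd hH f files hf hget]
  · intro e he s
    by_cases hneg : e.1 = -1
    · have : (e.1 != -1) = false := by simp [hneg]
      rw [Option.bind_some]
      simp only [this, Bool.false_eq_true, if_false]
      rw [hfs e he hneg]
      simp [pvT, hneg]
    · have : (e.1 != -1) = true := by simpa
      rw [Option.bind_some]
      simp only [this, if_true]
      simp [pvT, hneg]

-- memo invariant for B
def pvMemoOK (contents : List (String × List (Int × String))) (memo : PySem.Dict String Int) : Prop :=
  ∀ k v, PySem.Dict.get? memo k = some v → k ∈ pvKeys contents ∧ v = pvW contents k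

theorem pvSizeMemo_eq (contents : List (String × List (Int × String)))
    (hnd : (pvKeys contents).Nodup) (hH : pvH contents) (M : Nat) :
    ∀ (f : String), f ∈ pvKeys contents → pvM contents f ≤ M →
      ∀ (n : Nat) (memo : PySem.Dict String Int), pvM contents f < n → pvMemoOK contents memo →
      ∃ memo', pvSizeMemo (PySem.Dict.mk contents) n memo f = some (pvW contents f, memo') ∧
        pvMemoOK contents memo' := by
  induction M using Nat.strong_induction_on with
  | _ M IH =>
  intro f hf hM n memo hn hOK
  match n, hn with
  | n₀+1, hn =>
  show ∃ memo', (match PySem.Dict.get? memo f with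
    | some v => some (v, memo)
    | none => _) = some (pvW contents f, memo') ∧ pvMemoOK contents memo'
  cases hmemo : PySem.Dict.get? memo f with
  | some v =>
    obtain ⟨-, rfl⟩ := hOK f v hmemo
    exact ⟨memo, rfl, hOK⟩
  | none =>
    obtain ⟨files, hmem, hget⟩ := pvMem_get contents hnd f hf
    simp only [hget]
    have inner : ∀ (l : List (Int × String)), (∀ e ∈ l, e ∈ files) →
        ∀ (a : Int) (memo₁ : PySem.Dict String Int), pvMemoOK contents memo₁ →
        ∃ memo₂, l.foldl (fun acc entry =>
            acc.bind fun st =>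
              if entry.1 != -1 then some (st.1 + entry.1, st.2)
              else (pvSizeMemo (PySem.Dict.mk contents) n₀ st.2 (pvChild f entry.2)).map
                     fun r => (st.1 + r.1, r.2)) (some (a, memo₁))
          = some (a + (l.map (pvT contents f)).sum, memo₂) ∧ pvMemoOK contents memo₂ := by
      intro l
      induction l with
      | nil => intro _ a memo₁ h₁; exact ⟨memo₁, by simp, h₁⟩
      | cons e l' ihl =>
        intro hsub a memo₁ h₁
        by_cases hneg : e.1 = -1
        · obtain ⟨hck0, hclen0, -, -⟩ := hH (f, files) hmem e (hsub e List.mem_cons_self) hneg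
          have hck : pvChild f e.2 ∈ pvKeys contents := hck0
          have hclen : f.length < (pvChild f e.2).length := hclen0
          have hmc : pvM contents (pvChild f e.2) < pvM contents f :=
            pvM_child_lt contents f _ hck hclen
          obtain ⟨memo₂, hrun, h₂⟩ := IH (pvM contents (pvChild f e.2)) (by omega) _ hck
            (le_refl _) n₀ memo₁ (by omega) h₁
          obtain ⟨memo₃, hrun', h₃⟩ := ihl (fun e' he' => hsub e' (List.mem_cons_of_mem _ he'))
            (a + pvW contents (pvChild f e.2)) memo₂ h₂
          refine ⟨memo₃, ?_, h₃⟩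
          rw [List.foldl_cons, Option.bind_some]
          have hb : (e.1 != -1) = false := by simp [hneg]
          simp only [hb, Bool.false_eq_true, if_false]
          rw [hrun, Option.map_some]
          rw [hrun']
          congr 2
          simp [pvT, hneg]
          ring
        · have hb : (e.1 != -1) = true := by simpa
          obtain ⟨memo₃, hrun', h₃⟩ := ihl (fun e' he' => hsub e' (List.mem_cons_of_mem _ he'))
            (a + e.1) memo₁ h₁
          refine ⟨memo₃, ?_, h₃⟩
          rw [List.foldl_cons, Option.bind_some]
          simp only [hb, if_true]
          rw [hrun']
          congr 2
          simp [pvT, hneg]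
          ring
    obtain ⟨memo₂, hrun, h₂⟩ := inner files (fun e he => he) 0 memo hOK
    rw [hrun, Option.map_some]
    have hsum : (0 : Int) + (files.map (pvT contents f)).sum = pvW contents f := by
      rw [Int.zero_add, pvW_eq_sum contents hnd hH f files hf hget]
    rw [hsum]
    refine ⟨memo₂.insert f (pvW contents f), rfl, ?_⟩
    intro k v hkv
    rw [PySem.Dict.get?_insert] at hkv
    by_cases hk : k = f
    · subst hk
      simp at hkv
      exact ⟨hf, hkv.symm⟩
    · rw [if_neg hk] at hkv
      exact h₂ k v hkv

-- reading a stored size out of a dict whose items are ⟨k, pvW k⟩ for k ∈ P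
theorem pvMapFstPairs (contents : List (String × List (Int × String))) (P : List String) :
    List.map ((fun x => x.1) ∘ fun k => (k, pvW contents k)) P = P := by
  induction P with
  | nil => rfl
  | cons x xs ih => simp only [List.map_cons, ih]; rfl

theorem pvItems_get (contents : List (String × List (Int × String)))
    (fs : PySem.Dict String Int) (P : List String) (hPnd : P.Nodup)
    (hfs : fs.items = P.map (fun k => (k, pvW contents k))) (c : String) (hc : c ∈ P) :
    PySem.Dict.get? fs c = some (pvW contents c) := by
  obtain ⟨l⟩ := fs
  have hl : l = P.map (fun k => (k, pvW contents k)) := hfs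
  subst hl
  have hk : (PySem.Dict.mk (P.map (fun k => (k, pvW contents k)))).keys.Nodup := by
    rw [PySem.Dict.keys_mk, List.map_map, pvMapFstPairs]
    exact hPnd
  exact (PySem.Dict.get?_eq_some_iff_mem_items _ _ _ hk).mpr (List.mem_map_of_mem hc)

theorem pvContains_false (contents : List (String × List (Int × String)))
    (fs : PySem.Dict String Int) (P : List String)
    (hfs : fs.items = P.map (fun k => (k, pvW contents k))) (c : String) (hc : c ∉ P) :
    PySem.Dict.contains fs c = false := by
  obtain ⟨l⟩ := fs
  have hl : l = P.map (fun k => (k, pvW contents k)) := hfs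
  subst hl
  rw [PySem.Dict.contains_eq_decide_mem_keys, PySem.Dict.keys_mk, List.map_map, pvMapFstPairs]
  simp [hc]

-- A's main loop: folding deepest-first over L appends ⟨k, pvW k⟩ for each k
theorem pvAFold (contents : List (String × List (Int × String)))
    (hnd : (pvKeys contents).Nodup) (hH : pvH contents) (L : List String)
    (hLK : ∀ x ∈ L, x ∈ pvKeys contents) (hLnd : L.Nodup)
    (hLbef : ∀ P f Q, L = P ++ f :: Q → ∀ files,
      PySem.Dict.get? (PySem.Dict.mk contents) f = some files →
      ∀ e ∈ files, e.1 = -1 → pvChild f e.2 ∈ P) :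
    ∀ (Q P : List String) (fs : PySem.Dict String Int), L = P ++ Q →
      fs.items = P.map (fun k => (k, pvW contents k)) →
      ∃ fs', Q.foldl (fun acc folder => acc.bind fun fs =>
          (compute_folder_size (PySem.Dict.mk contents) folder fs).map fun s =>
            fs.insert folder s) (some fs) = some fs' ∧
        fs'.items = L.map (fun k => (k, pvW contents k)) := by
  intro Q
  induction Q with
  | nil =>
    intro P fs hL hfs
    refine ⟨fs, rfl, ?_⟩
    rw [hfs, hL, List.append_nil]
  | cons f Q' ih =>
    intro P fs hL hfs
    have hfL : f ∈ L := by rw [hL]; exact List.mem_append_right _ List.mem_cons_self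
    have hf : f ∈ pvKeys contents := hLK f hfL
    obtain ⟨files, hmem, hget⟩ := pvMem_get contents hnd f hf
    have hPnd : P.Nodup := ((List.nodup_append).mp (hL ▸ hLnd)).1
    have hfP : f ∉ P := by
      have hdisj := ((List.nodup_append).mp (hL ▸ hLnd)).2.2
      intro hc
      exact hdisj f hc f List.mem_cons_self rfl
    have hcfs : compute_folder_size (PySem.Dict.mk contents) f fs = some (pvW contents f) := by
      refine pvCfs_eq contents hnd hH f files hf hget fs ?_
      intro e he hneg
      have hc : pvChild f e.2 ∈ P := hLbef P f Q' hL files hget e he hneg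
      exact pvItems_get contents fs P hPnd hfs _ hc
    have hcont : PySem.Dict.contains fs f = false :=
      pvContains_false contents fs P hfs f hfP
    have hitems : (fs.insert f (pvW contents f)).items
        = (P ++ [f]).map (fun k => (k, pvW contents k)) := by
      rw [PySem.Dict.items_insert_of_not_contains fs _ hcont, hfs, List.map_append]
      rfl
    rw [List.foldl_cons, Option.bind_some, hcfs, Option.map_some]
    exact ih (P ++ [f]) (fs.insert f (pvW contents f)) (by rw [hL]; simp) hitems

-- B's main loop: the same items appear, with the memo staying correct
theorem pvBFold (contents : List (String × List (Int × String)))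
    (hnd : (pvKeys contents).Nodup) (hH : pvH contents) (L : List String)
    (hLK : ∀ x ∈ L, x ∈ pvKeys contents) (hLnd : L.Nodup) :
    ∀ (Q P : List String) (res memo : PySem.Dict String Int), L = P ++ Q →
      res.items = P.map (fun k => (k, pvW contents k)) → pvMemoOK contents memo →
      ∃ res' memo', Q.foldl (fun acc folder => acc.bind fun rm =>
          (pvSizeMemo (PySem.Dict.mk contents) (contents.length + 1) rm.2 folder).map fun r =>
            (rm.1.insert folder r.1, r.2)) (some (res, memo)) = some (res', memo') ∧
        res'.items = L.map (fun k => (k, pvW contents k)) ∧ pvMemoOK contents memo' := by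
  intro Q
  induction Q with
  | nil =>
    intro P res memo hL hres hOK
    refine ⟨res, memo, rfl, ?_, hOK⟩
    rw [hres, hL, List.append_nil]
  | cons f Q' ih =>
    intro P res memo hL hres hOK
    have hfL : f ∈ L := by rw [hL]; exact List.mem_append_right _ List.mem_cons_self
    have hf : f ∈ pvKeys contents := hLK f hfL
    have hMlt : pvM contents f < contents.length + 1 := by
      have h1 : pvM contents f ≤ (pvKeys contents).length := List.length_filter_le _ _
      have h2 : (pvKeys contents).length = contents.length := List.length_map _
      omega
    obtain ⟨memo', hrun, hOK'⟩ := pvSizeMemo_eq contents hnd hH (pvM contents f) f hf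
      (le_refl _) (contents.length + 1) memo hMlt hOK
    have hPnd : P.Nodup := ((List.nodup_append).mp (hL ▸ hLnd)).1
    have hfP : f ∉ P := by
      have hdisj := ((List.nodup_append).mp (hL ▸ hLnd)).2.2
      intro hc
      exact hdisj f hc f List.mem_cons_self rfl
    have hcont : PySem.Dict.contains res f = false :=
      pvContains_false contents res P hres f hfP
    have hitems : (res.insert f (pvW contents f)).items
        = (P ++ [f]).map (fun k => (k, pvW contents k)) := by
      rw [PySem.Dict.items_insert_of_not_contains res _ hcont, hres, List.map_append]
      rfl
    rw [List.foldl_cons, Option.bind_some, hrun, Option.map_some]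
    exact ih (P ++ [f]) (res.insert f (pvW contents f)) memo' (by rw [hL]; simp) hitems hOK'

-- ===== VERDICT (by name: the statement is the Claim_ definition above) =====
theorem compute_all_folders_sizes_spec : Claim_equal_compute_all_folders_sizes := by
  intro contents _ hpre
  obtain ⟨hnd', hroot', hrest⟩ := hpre
  have hnd : (pvKeys contents).Nodup := hnd'
  have hroot : "/" ∈ pvKeys contents := hroot'
  have hH := pvH_of_pre contents ⟨hnd', hroot', hrest⟩
  unfold Spec_compute_all_folders_sizes
  have hkeys : (PySem.Dict.mk contents).keys = pvKeys contents := PySem.Dict.keys_mk contents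
  set L0 := PySem.List.sorted (PySem.Dict.mk contents).keys (fun name => pvDepth name) true
    with hL0def
  have hmemL0 : ∀ x, x ∈ L0 ↔ x ∈ pvKeys contents := by
    intro x
    rw [hL0def, PySem.List.mem_sorted, hkeys]
  have hrootL0 : "/" ∈ L0 := (hmemL0 _).mpr hroot
  have hrem : PySem.List.remove? L0 "/" = some (L0.erase "/") :=
    PySem.List.remove?_eq_some_erase L0 "/" hrootL0
  set L := L0.erase "/" with hLdef
  have hL0nd : L0.Nodup := by
    rw [(PySem.List.sorted_perm (PySem.Dict.mk contents).keys (fun name => pvDepth name) true).nodup_iff, hkeys]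
    exact hnd
  have hLnd : L.Nodup := hL0nd.erase _
  have hLK : ∀ x ∈ L, x ∈ pvKeys contents := fun x hx =>
    (hmemL0 x).mp (List.mem_of_mem_erase hx)
  have hLne : ∀ x ∈ L, x ≠ "/" := fun x hx => ((List.Nodup.mem_erase_iff hL0nd).mp hx).1
  have hLm : ∀ x, x ∈ pvKeys contents → x ≠ "/" → x ∈ L := fun x h1 h2 =>
    (List.Nodup.mem_erase_iff hL0nd).mpr ⟨h2, (hmemL0 x).mpr h1⟩
  have hpw0 : L0.Pairwise (fun a b => pvDepth b ≤ pvDepth a) :=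
    PySem.List.sorted_pairwise_rev (PySem.Dict.mk contents).keys (fun name => pvDepth name)
  have hpwL : L.Pairwise (fun a b => pvDepth b ≤ pvDepth a) :=
    hpw0.sublist (List.erase_sublist ..)
  have hLbef : ∀ P f Q, L = P ++ f :: Q → ∀ files,
      PySem.Dict.get? (PySem.Dict.mk contents) f = some files →
      ∀ e ∈ files, e.1 = -1 → pvChild f e.2 ∈ P := by
    intro P f Q hLPQ files hget e he hneg
    have hfL : f ∈ L := by rw [hLPQ]; exact List.mem_append_right _ List.mem_cons_self
    have hfne : f ≠ "/" := hLne f hfL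
    have hmem := (pvGet_mem contents hnd f files hget).1
    obtain ⟨hck0, -, hdep0, hcne0⟩ := hH (f, files) hmem e he hneg
    have hck : pvChild f e.2 ∈ pvKeys contents := hck0
    have hcne : pvChild f e.2 ≠ "/" := hcne0
    have hdep : pvDepth f < pvDepth (pvChild f e.2) := hdep0 hfne
    have hcL : pvChild f e.2 ∈ L := hLm _ hck hcne
    rw [hLPQ] at hcL
    rcases List.mem_append.mp hcL with hcP | hcQ
    · exact hcP
    · rcases List.mem_cons.mp hcQ with hceq | hcQ'
      · rw [hceq] at hdep; omega
      · have hpair := (List.pairwise_append.mp (hLPQ ▸ hpwL)).2.1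
        have := (List.pairwise_cons.mp hpair).1 _ hcQ'
        omega
  have hempty : (PySem.Dict.empty : PySem.Dict String Int).items
      = ([] : List String).map (fun k => (k, pvW contents k)) := rfl
  -- the "/" folder, processed last by both programs
  obtain ⟨rootfiles, hrmem, hrget⟩ := pvMem_get contents hnd "/" hroot
  have hrchild : ∀ e ∈ rootfiles, e.1 = -1 → pvChild "/" e.2 ∈ L := by
    intro e he hneg
    obtain ⟨hck0, -, -, hcne0⟩ := hH ("/", rootfiles) hrmem e he hneg
    exact hLm _ hck0 hcne0
  -- A's result
  obtain ⟨fs', hfold, hitems⟩ := pvAFold contents hnd hH L hLK hLnd hLbef L [] PySem.Dict.empty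
    rfl hempty
  have hcfsr : compute_folder_size (PySem.Dict.mk contents) "/" fs' = some (pvW contents "/") := by
    refine pvCfs_eq contents hnd hH "/" rootfiles hroot hrget fs' ?_
    intro e he hneg
    exact pvItems_get contents fs' L hLnd hitems _ (hrchild e he hneg)
  have hcontr : PySem.Dict.contains fs' "/" = false :=
    pvContains_false contents fs' L hitems "/" (fun hc => hLne _ hc rfl)
  have hitemsA : (fs'.insert "/" (pvW contents "/")).items
      = L.map (fun k => (k, pvW contents k)) ++ [("/", pvW contents "/")] := by
    rw [PySem.Dict.items_insert_of_not_contains fs' _ hcontr, hitems]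
  have hA : compute_all_folders_sizes contents
      = L.map (fun k => (k, pvW contents k)) ++ [("/", pvW contents "/")] := by
    unfold compute_all_folders_sizes
    simp only [← hL0def]
    simp only [hrem, hfold, Option.bind_some, hcfsr, Option.map_some]
    exact hitemsA
  -- B's result
  have hOKempty : pvMemoOK contents PySem.Dict.empty := by
    intro k v hkv
    rw [PySem.Dict.get?_empty] at hkv
    cases hkv
  obtain ⟨res', memo', hrunB, hitemsB, hOK'⟩ := pvBFold contents hnd hH L hLK hLnd L []
    PySem.Dict.empty PySem.Dict.empty rfl hempty hOKempty
  have hMr : pvM contents "/" < contents.length + 1 := by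
    have h1 : pvM contents "/" ≤ (pvKeys contents).length := List.length_filter_le _ _
    have h2 : (pvKeys contents).length = contents.length := List.length_map _
    omega
  obtain ⟨memo'', hrunr, -⟩ := pvSizeMemo_eq contents hnd hH (pvM contents "/") "/" hroot
    (le_refl _) (contents.length + 1) memo' hMr hOK'
  have hcontrB : PySem.Dict.contains res' "/" = false :=
    pvContains_false contents res' L hitemsB "/" (fun hc => hLne _ hc rfl)
  have hitemsBr : (res'.insert "/" (pvW contents "/")).items
      = L.map (fun k => (k, pvW contents k)) ++ [("/", pvW contents "/")] := by
    rw [PySem.Dict.items_insert_of_not_contains res' _ hcontrB, hitemsB]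
  have hstep : (fun (acc : Option (PySem.Dict String Int × PySem.Dict String Int)) folder =>
        acc.bind fun rm =>
          if folder != "/" then
            (pvSizeMemo (PySem.Dict.mk contents) (contents.length + 1) rm.2 folder).map fun r =>
              (rm.1.insert folder r.1, r.2)
          else some rm)
      = fun acc folder =>
          if (folder != "/") = true then
            (acc.bind fun rm =>
              (pvSizeMemo (PySem.Dict.mk contents) (contents.length + 1) rm.2 folder).map fun r =>
                (rm.1.insert folder r.1, r.2))
          else acc := by
    funext acc folder
    cases acc with
    | none => simp
    | some rm => simp
  have hfilter : L0.filter (fun x => x != "/") = L := (hL0nd.erase_eq_filter "/").symm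
  have hB : compute_all_folders_sizes_alt contents
      = L.map (fun k => (k, pvW contents k)) ++ [("/", pvW contents "/")] := by
    unfold compute_all_folders_sizes_alt
    simp only [← hL0def]
    simp only [hstep]
    rw [← List.foldl_filter, hfilter]
    simp only [hrunB, Option.bind_some, hrunr, Option.map_some]
    exact hitemsBr
  rw [hA, hB]
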